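-- pv_equiv track=rewrite | github.com/maghams62/auto_mac | src/agent/multi_source_reasoner.py | _parse_conflict_response
-- ===== SOURCE A (Python) =====
-- from typing import Any, Dict, List, Optional, Set
--
-- def _parse_conflict_response(response: str) -> List[Dict[str, Any]]:
--     """
--     Parse LLM response for conflicts.
--
--     Args:
--         response: LLM response text
--
--     Returns:
--         List of conflict dictionaries
--     """
--     if "NO_CONFLICTS" in response:
--         return []
--
--     conflicts = []
--     current_conflict = {}
--
--     for line in response.strip().split("\n"):
--         line = line.strip()
--
--         if line.startswith("CONFLICT:"):
--             if current_conflict: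
--                 conflicts.append(current_conflict)
--             current_conflict = {}
--
--         elif line.startswith("- Source 1:"):
--             current_conflict["source1"] = line.replace("- Source 1:", "").strip()
--
--         elif line.startswith("- Source 2:"):
--             current_conflict["source2"] = line.replace("- Source 2:", "").strip()
--
--         elif line.startswith("- Description:"):
--             current_conflict["description"] = line.replace("- Description:", "").strip()
--
--     # Add last conflict
--     if current_conflict:
--         conflicts.append(current_conflict)
--
--     return conflicts
-- ===== SOURCE B (Python) =====
-- _FIELDS = [("source1", "- Source 1:"), ("source2", "- Source 2:"), ("description", "- Description:")]
--
--
-- def _split_groups(lines):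
--     # backwards pass: a CONFLICT line closes the group of the lines seen after it
--     groups, cur = [], []
--     for line in reversed(lines):
--         if line.startswith("CONFLICT:"):
--             groups.append(cur)
--             cur = []
--         else:
--             cur.append(line)
--     groups.append(cur)
--     return [list(reversed(g)) for g in reversed(groups)]
--
--
-- def _parse_group(group):
--     d = {}
--     for line in group:
--         hit = next(((key, pref) for key, pref in _FIELDS if line.startswith(pref)), None)
--         if hit is not None:
--             d[hit[0]] = line.replace(hit[1], "").strip()
--     return d
--
--
-- def _parse_conflict_response(response):
--     if "NO_CONFLICTS" in response:
--         return []
--     lines = [line.strip() for line in response.strip().split("\n")]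
--     return [d for d in map(_parse_group, _split_groups(lines)) if d]
-- ===== Notes on version B (the rewrite author's own statement) =====
-- stated objective: alternative
-- what changed: A is one incremental state machine that flushes a running dict at each CONFLICT marker; B first splits the stripped lines into groups in a backwards pass over the CONFLICT lines, then maps a table-driven field parser over the groups and filters out empty dicts.
import Mathlib
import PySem

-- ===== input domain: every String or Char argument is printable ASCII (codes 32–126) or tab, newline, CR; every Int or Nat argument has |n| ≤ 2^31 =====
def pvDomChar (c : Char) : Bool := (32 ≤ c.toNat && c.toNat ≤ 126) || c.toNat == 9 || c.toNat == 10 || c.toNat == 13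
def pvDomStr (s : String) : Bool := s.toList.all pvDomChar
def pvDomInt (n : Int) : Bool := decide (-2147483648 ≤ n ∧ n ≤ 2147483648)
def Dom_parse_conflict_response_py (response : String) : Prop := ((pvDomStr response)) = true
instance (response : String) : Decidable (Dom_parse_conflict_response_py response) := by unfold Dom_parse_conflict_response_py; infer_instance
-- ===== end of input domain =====

-- B replaces A's incremental flush-on-marker state machine by a group-then-parse
-- decomposition (backwards split at CONFLICT lines, table-driven field parser, filter);
-- same cost, alternative structure.

-- ===== PORT A =====
-- loop body of A's `for line in response.strip().split("\n")`, split so the strip of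
-- the raw line is the explicit outer step
def pvStepBody (st : List (PySem.Dict String String) × PySem.Dict String String)
    (line : String) : List (PySem.Dict String String) × PySem.Dict String String :=
  if PySem.Str.startswith line "CONFLICT:" then
    (if st.2.items.isEmpty then st.1 else st.1 ++ [st.2], PySem.Dict.empty)
  else if PySem.Str.startswith line "- Source 1:" then
    (st.1, st.2.insert "source1" (PySem.Str.strip (PySem.Str.replace line "- Source 1:" "")))
  else if PySem.Str.startswith line "- Source 2:" then
    (st.1, st.2.insert "source2" (PySem.Str.strip (PySem.Str.replace line "- Source 2:" "")))
  else if PySem.Str.startswith line "- Description:" then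
    (st.1, st.2.insert "description" (PySem.Str.strip (PySem.Str.replace line "- Description:" "")))
  else st

def pvStepA (st : List (PySem.Dict String String) × PySem.Dict String String)
    (raw : String) : List (PySem.Dict String String) × PySem.Dict String String :=
  pvStepBody st (PySem.Str.strip raw)

def parse_conflict_response_py (response : String) : List (List (String × String)) :=
  if PySem.Str.isIn "NO_CONFLICTS" response then []
  else
    let res := ((PySem.Str.split? (PySem.Str.strip response) "\n").getD []).foldl pvStepA
      ([], PySem.Dict.empty)
    let conflicts := if res.2.items.isEmpty then res.1 else res.1 ++ [res.2]
    conflicts.map (·.items)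

-- ===== PORT B =====
def pvFields : List (String × String) :=
  [("source1", "- Source 1:"), ("source2", "- Source 2:"), ("description", "- Description:")]

-- backwards pass of Source B's _split_groups: fold over reversed(lines), then reverse back
def pvSplitStep (st : List (List String) × List String) (line : String) :
    List (List String) × List String :=
  if PySem.Str.startswith line "CONFLICT:" then (st.1 ++ [st.2], [])
  else (st.1, st.2 ++ [line])

def pvSplitGroups (lines : List String) : List (List String) :=
  let st := lines.reverse.foldl pvSplitStep ([], [])
  ((st.1 ++ [st.2]).reverse).map List.reverse

def pvParseLine (d : PySem.Dict String String) (line : String) : PySem.Dict String String :=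
  match pvFields.find? (fun kp => PySem.Str.startswith line kp.2) with
  | some kp => d.insert kp.1 (PySem.Str.strip (PySem.Str.replace line kp.2 ""))
  | none => d

def pvParseGroup (group : List String) : PySem.Dict String String :=
  group.foldl pvParseLine PySem.Dict.empty

def parse_conflict_response_py_alt (response : String) : List (List (String × String)) :=
  if PySem.Str.isIn "NO_CONFLICTS" response then []
  else
    let lines := ((PySem.Str.split? (PySem.Str.strip response) "\n").getD []).map PySem.Str.strip
    ((((pvSplitGroups lines).map pvParseGroup).filter
      (fun d => !d.items.isEmpty)).map (·.items))

-- ===== PRECONDITION & SPEC =====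
def Spec_parse_conflict_response_py (response : String) (out : List (List (String × String))) : Prop := out = parse_conflict_response_py_alt response
instance (response : String) (out : List (List (String × String))) : Decidable (Spec_parse_conflict_response_py response out) := by unfold Spec_parse_conflict_response_py; infer_instance

-- ===== CLAIM (what is proved, stated in full; the proofs are below) =====
def Claim_equal_parse_conflict_response_py : Prop := ∀ (response : String), Dom_parse_conflict_response_py response → Spec_parse_conflict_response_py response (parse_conflict_response_py response)

-- ===== LEMMAS AND PROOFS =====

-- recursive characterization of B's grouping, used by the induction
def pvSplitGroupsRec : List String → List (List String)
  | [] => [[]]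
  | head :: rest =>
    if PySem.Str.startswith head "CONFLICT:" then [] :: pvSplitGroupsRec rest
    else
      match pvSplitGroupsRec rest with
      | g :: gs => (head :: g) :: gs
      | [] => [[head]]

theorem pvSplitGroups_eq_rec (lines : List String) :
    pvSplitGroups lines = pvSplitGroupsRec lines := by
  induction lines with
  | nil => rfl
  | cons l rest ih =>
    simp only [pvSplitGroups, List.reverse_cons, List.foldl_append, List.foldl_cons,
      List.foldl_nil] at *
    cases h : PySem.Str.startswith l "CONFLICT:" with
    | true =>
      simp only [pvSplitGroupsRec, h, if_true, ← ih, pvSplitStep, List.reverse_append,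
        List.map_append, List.append_assoc]
      simp
    | false =>
      simp only [pvSplitGroupsRec, h, Bool.false_eq_true, if_false, ← ih]
      simp only [pvSplitStep, h, Bool.false_eq_true, if_false]
      simp

-- A's trailing flush, as a function of the loop state
def pvFinish (st : List (PySem.Dict String String) × PySem.Dict String String) :
    List (PySem.Dict String String) :=
  if st.2.items.isEmpty then st.1 else st.1 ++ [st.2]

-- B's per-group parse started from an arbitrary dict (the running first group)
def pvParseFrom (d : PySem.Dict String String) (g : List String) : PySem.Dict String String :=
  g.foldl pvParseLine d

-- B's result on the remaining lines, the first group continuing dict `cur`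
def pvGroupsParse (cur : PySem.Dict String String) (L : List String) :
    List (PySem.Dict String String) :=
  match pvSplitGroupsRec L with
  | g :: gs => ((pvParseFrom cur g) :: gs.map pvParseGroup).filter (fun d => !d.items.isEmpty)
  | [] => []

theorem pvSplitGroupsRec_ne_nil (L : List String) : pvSplitGroupsRec L ≠ [] := by
  cases L with
  | nil => simp [pvSplitGroupsRec]
  | cons h t =>
    simp only [pvSplitGroupsRec]
    split
    · simp
    · cases hg : pvSplitGroupsRec t <;> simp

theorem pvGroupsParse_empty (L : List String) :
    pvGroupsParse PySem.Dict.empty L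
      = ((pvSplitGroupsRec L).map pvParseGroup).filter (fun d => !d.items.isEmpty) := by
  unfold pvGroupsParse
  obtain ⟨g, gs, hg⟩ := List.exists_cons_of_ne_nil (pvSplitGroupsRec_ne_nil L)
  simp [hg, pvParseGroup, pvParseFrom]

-- A's elif chain over a non-CONFLICT line is B's table lookup
theorem pvStepBody_field (st : List (PySem.Dict String String) × PySem.Dict String String)
    (l : String) (h : PySem.Str.startswith l "CONFLICT:" = false) :
    pvStepBody st l = (st.1, pvParseLine st.2 l) := by
  cases hA : PySem.Str.startswith l "- Source 1:" <;>
    cases hB : PySem.Str.startswith l "- Source 2:" <;>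
      cases hC : PySem.Str.startswith l "- Description:" <;>
        simp only [pvStepBody, pvParseLine, pvFields, List.find?, h, hA, hB, hC,
          Bool.false_eq_true, if_true, if_false]

-- A's CONFLICT branch
theorem pvStepBody_conflict (st : List (PySem.Dict String String) × PySem.Dict String String)
    (l : String) (h : PySem.Str.startswith l "CONFLICT:" = true) :
    pvStepBody st l
      = (if st.2.items.isEmpty then st.1 else st.1 ++ [st.2], PySem.Dict.empty) := by
  simp only [pvStepBody, h, ite_true]

-- main invariant: the flushed state machine equals the group-wise parse
theorem pvMain (L : List String) (conf : List (PySem.Dict String String))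
    (cur : PySem.Dict String String) :
    pvFinish (L.foldl pvStepBody (conf, cur)) = conf ++ pvGroupsParse cur L := by
  induction L generalizing conf cur with
  | nil =>
    simp only [List.foldl_nil, pvFinish, pvGroupsParse, pvSplitGroupsRec, pvParseFrom,
      List.foldl_nil, List.map_nil, List.filter_cons, List.filter_nil]
    cases hc : cur.items.isEmpty <;> simp
  | cons l rest ih =>
    obtain ⟨g, gs, hg⟩ := List.exists_cons_of_ne_nil (pvSplitGroupsRec_ne_nil rest)
    cases h : PySem.Str.startswith l "CONFLICT:" with
    | true =>
      rw [List.foldl_cons, pvStepBody_conflict (conf, cur) l h, ih]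
      have hrhs : pvGroupsParse cur (l :: rest)
          = (if cur.items.isEmpty then [] else [cur]) ++ pvGroupsParse PySem.Dict.empty rest := by
        simp only [pvGroupsParse, pvSplitGroupsRec, h, if_true, pvParseFrom, List.foldl_nil, hg,
          List.filter_cons, pvParseGroup, List.map_cons]
        cases hc : cur.items.isEmpty <;> simp
      rw [hrhs, ← List.append_assoc]
      cases hc : cur.items.isEmpty <;> simp
    | false =>
      rw [List.foldl_cons, pvStepBody_field (conf, cur) l h, ih]
      congr 1
      simp only [pvGroupsParse, pvSplitGroupsRec, h, Bool.false_eq_true, if_false, hg,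
        pvParseFrom, List.foldl_cons]

-- ===== VERDICT (by name: the statement is the Claim_ definition above) =====
theorem parse_conflict_response_py_spec : Claim_equal_parse_conflict_response_py := by
  intro response _
  unfold Spec_parse_conflict_response_py parse_conflict_response_py parse_conflict_response_py_alt
  cases h : PySem.Str.isIn "NO_CONFLICTS" response with
  | true => simp only [ite_true]
  | false =>
    simp only [Bool.false_eq_true, if_false]
    have hfold : ((PySem.Str.split? (PySem.Str.strip response) "\n").getD []).foldl pvStepA
        ([], PySem.Dict.empty)
        = (((PySem.Str.split? (PySem.Str.strip response) "\n").getD []).map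
            PySem.Str.strip).foldl pvStepBody ([], PySem.Dict.empty) := by
      rw [List.foldl_map]
      rfl
    have hmain := pvMain ((((PySem.Str.split? (PySem.Str.strip response) "\n")).getD []).map
      PySem.Str.strip) [] PySem.Dict.empty
    rw [pvGroupsParse_empty, List.nil_append] at hmain
    rw [hfold, pvSplitGroups_eq_rec]
    unfold pvFinish at hmain
    rw [hmain]
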